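-- pv_equiv track=rewrite | github.com/dchud/mrrc-testbed | scripts/set_mrrc_source.py | remove_patch_section
-- ===== SOURCE A (Python) =====
-- def remove_patch_section(text: str) -> str:
--     """Remove the [patch.crates-io] section and everything below it."""
--     lines = text.splitlines(keepends=True)
--     result: list[str] = []
--     in_patch = False
--     for line in lines:
--         if line.strip() == "[patch.crates-io]":
--             in_patch = True
--             continue
--         if in_patch:
--             # A new section header ends the patch section
--             if line.strip().startswith("[") and line.strip() != "[patch.crates-io]":
--                 in_patch = False
--                 result.append(line)
--             continue
--         result.append(line)
--     # Strip trailing blank lines, add single newline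
--     return "".join(result).rstrip() + "\n"
-- ===== SOURCE B (Python) =====
-- def remove_patch_section(text: str) -> str:
--     """Remove the [patch.crates-io] section and everything below it."""
--     lines = text.splitlines(keepends=True)
--     # Pass 1: partition lines into a preamble and header-led groups.
--     preamble = []
--     groups = []
--     current = None  # (header_line, body_lines) of the group in progress
--     for line in lines:
--         if line.strip().startswith("["):
--             if current is not None:
--                 groups.append(current)
--             current = (line, [])
--         elif current is not None:
--             current[1].append(line)
--         else:
--             preamble.append(line)
--     if current is not None:
--         groups.append(current)
--     # Pass 2: keep the preamble and every non-patch group.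
--     kept = list(preamble)
--     for header, body in groups:
--         if header.strip() != "[patch.crates-io]":
--             kept.append(header)
--             kept.extend(body)
--     return "".join(kept).rstrip() + "\n"
-- ===== Notes on version B (the rewrite author's own statement) =====
-- stated objective: alternative
-- what changed: Replaces A's one-pass in_patch state machine with a two-pass decomposition: first partition the lines into a preamble plus header-led groups, then keep the preamble and every group whose header is not [patch.crates-io] and concatenate.
import Mathlib
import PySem

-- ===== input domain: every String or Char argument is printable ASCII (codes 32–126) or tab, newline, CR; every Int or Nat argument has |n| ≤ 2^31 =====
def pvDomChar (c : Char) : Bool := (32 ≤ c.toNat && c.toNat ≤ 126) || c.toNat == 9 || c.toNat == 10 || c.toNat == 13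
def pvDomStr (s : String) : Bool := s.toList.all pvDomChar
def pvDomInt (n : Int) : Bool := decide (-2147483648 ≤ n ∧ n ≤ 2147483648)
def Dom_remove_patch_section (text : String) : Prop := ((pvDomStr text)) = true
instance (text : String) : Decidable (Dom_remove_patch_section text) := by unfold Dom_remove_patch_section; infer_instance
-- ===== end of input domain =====

-- B replaces A's one-pass in_patch state machine by a two-pass grouping decomposition
-- (partition into preamble + header-led groups, then drop the [patch.crates-io] groups);
-- objective: alternative (same cost, different structure).

-- ===== PORT A =====

-- shared helper: text.splitlines(keepends=True), exact on Dom's chars (\n, \r, \r\n are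
-- the only line boundaries among printable ASCII + tab/newline/CR)
def rpSplitKeep (cur : List Char) : List Char → List (List Char)
  | [] => if cur.isEmpty then [] else [cur.reverse]
  | c :: cs =>
    if c = '\n' then (cur.reverse ++ ['\n']) :: rpSplitKeep [] cs
    else if c = '\r' then
      match cs with
      | '\n' :: cs' => (cur.reverse ++ ['\r', '\n']) :: rpSplitKeep [] cs'
      | [] => (cur.reverse ++ ['\r']) :: rpSplitKeep [] []
      | c' :: cs' => (cur.reverse ++ ['\r']) :: rpSplitKeep [] (c' :: cs')
    else rpSplitKeep (c :: cur) cs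
termination_by l => l.length
decreasing_by all_goals (simp only [List.length_cons, List.length_nil]; omega)

def rpPat : List Char := "[patch.crates-io]".toList

-- A's loop: state (result, in_patch)
def rpALoop : List (List Char) → List (List Char) → Bool → List (List Char)
  | [], res, _ => res
  | l :: ls, res, inp =>
    if PySem.Chars.strip l = rpPat then rpALoop ls res true
    else if inp then
      if PySem.Chars.startswith (PySem.Chars.strip l) ['['] ∧ ¬ (PySem.Chars.strip l = rpPat)
      then rpALoop ls (res ++ [l]) false
      else rpALoop ls res inp
    else rpALoop ls (res ++ [l]) false

def remove_patch_section (text : String) : String :=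
  let lines := rpSplitKeep [] text.toList
  let result := rpALoop lines [] false
  String.mk (PySem.Chars.rstrip result.flatten ++ ['\n'])

-- ===== PORT B =====

-- pass-1 state: (preamble, finished groups, group in progress)
def rpBState : Type := List (List Char) × List (List Char × List (List Char)) × Option (List Char × List (List Char))

def rpBStep (st : rpBState) (l : List Char) : rpBState :=
  if PySem.Chars.startswith (PySem.Chars.strip l) ['['] then
    match st.2.2 with
    | some g => (st.1, st.2.1 ++ [g], some (l, []))
    | none => (st.1, st.2.1, some (l, []))
  else
    match st.2.2 with
    | some (h, b) => (st.1, st.2.1, some (h, b ++ [l]))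
    | none => (st.1 ++ [l], st.2.1, none)

-- pass 2: keep every non-patch group
def rpBKeep : List (List Char × List (List Char)) → List (List Char) → List (List Char)
  | [], kept => kept
  | (h, b) :: gs, kept =>
    if ¬ (PySem.Chars.strip h = rpPat) then rpBKeep gs (kept ++ h :: b) else rpBKeep gs kept

def remove_patch_section_alt (text : String) : String :=
  let lines := rpSplitKeep [] text.toList
  let st := lines.foldl rpBStep ([], [], none)
  let groups := st.2.1 ++ st.2.2.toList
  let kept := rpBKeep groups st.1
  String.mk (PySem.Chars.rstrip kept.flatten ++ ['\n'])

-- ===== PRECONDITION & SPEC =====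
def Spec_remove_patch_section (text : String) (out : String) : Prop := out = remove_patch_section_alt text
instance (text : String) (out : String) : Decidable (Spec_remove_patch_section text out) := by unfold Spec_remove_patch_section; infer_instance

-- ===== CLAIM (what is proved, stated in full; the proofs are below) =====
def Claim_equal_remove_patch_section : Prop := ∀ (text : String), Dom_remove_patch_section text → Spec_remove_patch_section text (remove_patch_section text)

-- ===== LEMMAS AND PROOFS =====

-- A's accumulator only grows on the right
theorem rpALoop_acc (ls : List (List Char)) : ∀ (res : List (List Char)) (inp : Bool),
    rpALoop ls res inp = res ++ rpALoop ls [] inp := by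
  induction ls with
  | nil => intro res inp; simp [rpALoop]
  | cons l ls ih =>
    intro res inp
    by_cases h1 : PySem.Chars.strip l = rpPat
    · simp only [rpALoop, h1, if_pos]
      exact ih res true
    · by_cases h2 : PySem.Chars.startswith (PySem.Chars.strip l) ['['] = true
      · cases inp with
        | false =>
          simp [rpALoop, h1, h2]
          rw [ih (res ++ [l]), ih [l]]; simp
        | true =>
          simp [rpALoop, h1, h2]
          rw [ih (res ++ [l]), ih [l]]; simp
      · cases inp with
        | false =>
          simp [rpALoop, h1, h2]
          rw [ih (res ++ [l]), ih [l]]; simp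
        | true =>
          simp [rpALoop, h1, h2]
          exact ih res true

-- B's second pass processes an appended group list in two stages
theorem rpBKeep_append (gs₁ gs₂ : List (List Char × List (List Char))) :
    ∀ (kept : List (List Char)),
    rpBKeep (gs₁ ++ gs₂) kept = rpBKeep gs₂ (rpBKeep gs₁ kept) := by
  induction gs₁ with
  | nil => intro kept; rfl
  | cons g gs ih =>
    intro kept
    obtain ⟨h, b⟩ := g
    by_cases hp : PySem.Chars.strip h = rpPat
    · simp [rpBKeep, hp, ih]
    · simp [rpBKeep, hp, ih]

-- B's second pass on a single group
theorem rpBKeep_single (h : List Char) (b : List (List Char)) (kept : List (List Char)) :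
    rpBKeep [(h, b)] kept =
      if PySem.Chars.strip h = rpPat then kept else kept ++ h :: b := by
  by_cases hp : PySem.Chars.strip h = rpPat <;> simp [rpBKeep, hp]

-- render a pass-1 state to the final kept list
def rpK (st : rpBState) : List (List Char) :=
  rpBKeep (st.2.1 ++ st.2.2.toList) st.1

-- does the group in progress carry the patch header?
def rpPend : Option (List Char × List (List Char)) → Bool
  | some (h, _) => decide (PySem.Chars.strip h = rpPat)
  | none => false

theorem rpPat_header : PySem.Chars.startswith (PySem.Chars.strip rpPat) ['['] = true := by decide

-- main invariant: on reachable states (no group yet → no finished groups),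
-- rendering the folded state = rendered start state ++ A's remaining output
theorem rpMain (ls : List (List Char)) : ∀ (pre : List (List Char))
    (done : List (List Char × List (List Char))) (cur : Option (List Char × List (List Char))),
    (cur = none → done = []) →
    rpK (ls.foldl rpBStep (pre, done, cur)) = rpK (pre, done, cur) ++ rpALoop ls [] (rpPend cur) := by
  induction ls with
  | nil => intro pre done cur _; simp [rpALoop]
  | cons l ls ih =>
    intro pre done cur hd
    by_cases hh : PySem.Chars.startswith (PySem.Chars.strip l) ['['] = true
    · -- header line: finishes the open group, opens a new one
      have hstep : rpBStep (pre, done, cur) l = (pre, done ++ cur.toList, some (l, [])) := by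
        cases cur <;> simp_all [rpBStep, hh]
      rw [List.foldl_cons, hstep, ih _ _ _ (by intro h; cases h)]
      have hKeq : rpK (pre, done ++ cur.toList, some (l, [])) =
          if PySem.Chars.strip l = rpPat then rpK (pre, done, cur)
          else rpK (pre, done, cur) ++ [l] := by
        show rpBKeep ((done ++ cur.toList) ++ [(l, [])]) pre = _
        rw [rpBKeep_append, rpBKeep_single]
        rfl
      rw [hKeq]
      by_cases hp : PySem.Chars.strip l = rpPat
      · -- patch header: group dropped by both sides
        simp only [if_pos hp]
        have hA : rpALoop (l :: ls) [] (rpPend cur) = rpALoop ls [] true := by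
          simp [rpALoop, hp]
        rw [hA]
        simp [rpPend, hp]
      · -- non-patch header: kept by both sides
        simp only [if_neg hp]
        have hA : rpALoop (l :: ls) [] (rpPend cur) = l :: rpALoop ls [] false := by
          cases hc : rpPend cur with
          | false => simp [rpALoop, hp, hh]; rw [rpALoop_acc ls [l] false]; rfl
          | true => simp [rpALoop, hp, hh]; rw [rpALoop_acc ls [l] false]; rfl
        rw [hA]
        simp [rpPend, hp]
    · -- non-header line
      have hp : ¬ (PySem.Chars.strip l = rpPat) := by
        intro hq; exact hh (by rw [hq]; exact rpPat_header)
      cases cur with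
      | none =>
        have hd0 : done = [] := hd rfl
        subst hd0
        have hstep : rpBStep (pre, [], none) l = (pre ++ [l], [], none) := by
          simp [rpBStep, hh]
        rw [List.foldl_cons, hstep, ih _ _ _ (fun _ => rfl)]
        have hKeq : rpK (pre ++ [l], [], (none : Option (List Char × List (List Char)))) =
            rpK (pre, [], none) ++ [l] := by
          simp [rpK, rpBKeep]
        rw [hKeq]
        have hA : rpALoop (l :: ls) [] (rpPend (none : Option (List Char × List (List Char)))) =
            l :: rpALoop ls [] false := by
          simp [rpALoop, hp, rpPend]
          rw [rpALoop_acc ls [l] false]; rfl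
        rw [hA]; simp [rpPend]
      | some g =>
        obtain ⟨h, b⟩ := g
        have hstep : rpBStep (pre, done, some (h, b)) l = (pre, done, some (h, b ++ [l])) := by
          simp [rpBStep, hh]
        rw [List.foldl_cons, hstep, ih _ _ _ (by intro hx; cases hx)]
        have hpend : rpPend (some (h, b ++ [l])) = rpPend (some (h, b)) := rfl
        rw [hpend]
        by_cases hq : PySem.Chars.strip h = rpPat
        · -- inside a patch group: line dropped by both
          have hKeq : rpK (pre, done, some (h, b ++ [l])) = rpK (pre, done, some (h, b)) := by
            show rpBKeep (done ++ [(h, b ++ [l])]) pre = rpBKeep (done ++ [(h, b)]) pre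
            rw [rpBKeep_append, rpBKeep_append, rpBKeep_single, rpBKeep_single]; simp [hq]
          rw [hKeq]
          have hA : rpALoop (l :: ls) [] (rpPend (some (h, b))) =
              rpALoop ls [] (rpPend (some (h, b))) := by
            simp [rpALoop, hp, hh, rpPend, hq]
          rw [hA]
        · -- inside a kept group: line kept by both
          have hKeq : rpK (pre, done, some (h, b ++ [l])) =
              rpK (pre, done, some (h, b)) ++ [l] := by
            show rpBKeep (done ++ [(h, b ++ [l])]) pre = rpBKeep (done ++ [(h, b)]) pre ++ [l]
            rw [rpBKeep_append, rpBKeep_append, rpBKeep_single, rpBKeep_single,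
                if_neg hq, if_neg hq]
            simp
          rw [hKeq]
          have hA : rpALoop (l :: ls) [] (rpPend (some (h, b))) =
              l :: rpALoop ls [] false := by
            simp [rpALoop, hp, rpPend, hq]
            rw [rpALoop_acc ls [l] false]; rfl
          rw [hA]
          have hf : rpPend (some (h, b)) = false := by simp [rpPend, hq]
          rw [hf]; simp

-- the two kept-line lists agree
theorem rpKept_eq (ls : List (List Char)) :
    rpK (ls.foldl rpBStep ([], [], none)) = rpALoop ls [] false := by
  have := rpMain ls [] [] none (fun _ => rfl)
  simpa [rpK, rpBKeep, rpPend] using this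

-- ===== VERDICT (by name: the statement is the Claim_ definition above) =====
theorem remove_patch_section_spec : Claim_equal_remove_patch_section := by
  intro text _
  unfold Spec_remove_patch_section remove_patch_section remove_patch_section_alt
  exact congrArg (fun k => String.mk (PySem.Chars.rstrip k.flatten ++ ['\n']))
    (rpKept_eq (rpSplitKeep [] text.toList)).symm
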